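-- pv_equiv track=rewrite | github.com/waleoyediran/adventofcode-2025 | day6.py | get_operation_ranges
-- ===== SOURCE A (Python) =====
-- def get_operation_ranges(ops_row):
--     ranges = dict()
--     current_op, start = ops_row[0], 0
--     for i in range(1,len(ops_row)):
--         char = ops_row[i]
--         if char == ' ': continue
--         ranges[(start,i-2)] = current_op
--         current_op, start = ops_row[i], i
--     ranges[(start,len(ops_row)-1)] = current_op
--
--     return ranges
-- ===== SOURCE B (Python) =====
-- def get_operation_ranges(ops_row):
--     # Built back-to-front: walk the row right-to-left carrying the current
--     # range end, collect entries in reverse, then materialise the dict.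
--     end = len(ops_row) - 1
--     rev = []
--     for i in reversed(range(1, len(ops_row))):
--         c = ops_row[i]
--         if c != ' ':
--             rev.append(((i, end), c))
--             end = i - 2
--     rev.append(((0, end), ops_row[0]))
--     return dict(reversed(rev))
-- ===== Notes on version B (the rewrite author's own statement) =====
-- stated objective: alternative
-- what changed: Builds the result back-to-front: a right-to-left scan carries the current range END (instead of A's left-to-right scan carrying the current op and START), collects the entries in reverse, and the dict is materialised once at the end from the reversed entry list.
-- outside the precondition, e.g. on get_operation_ranges(''): A raises IndexError, B raises IndexError
import Mathlib
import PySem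

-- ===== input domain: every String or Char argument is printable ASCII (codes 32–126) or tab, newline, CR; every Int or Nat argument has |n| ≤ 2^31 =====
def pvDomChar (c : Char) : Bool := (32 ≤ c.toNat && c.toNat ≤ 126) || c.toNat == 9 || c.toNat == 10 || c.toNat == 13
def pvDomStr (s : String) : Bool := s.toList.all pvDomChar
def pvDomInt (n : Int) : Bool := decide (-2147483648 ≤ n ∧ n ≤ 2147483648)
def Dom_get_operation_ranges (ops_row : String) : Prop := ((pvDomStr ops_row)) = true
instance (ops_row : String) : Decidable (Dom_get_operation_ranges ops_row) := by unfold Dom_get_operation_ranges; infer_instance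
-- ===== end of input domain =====

-- B builds the result back-to-front: a right-to-left scan carries the current
-- range END, collects entries in reverse, and the dict is built once at the end;
-- objective: alternative decomposition, same cost.

-- ===== PORT A =====
-- A-side helper: the literal body of A's for-loop ('char = ops_row[i]; if char == ' ': continue; …')
def pvStepARaw (ops_row : String) (st : PySem.Dict (Int × Int) String × Char × Int) (i : Int) :
    PySem.Dict (Int × Int) String × Char × Int :=
  match PySem.Str.pyGet? ops_row i with
  | none => st  -- unreachable: i is in range
  | some ch =>
    if ch = ' ' then st
    else (st.1.insert (st.2.2, i - 2) (String.singleton st.2.1), ch, i)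

def get_operation_ranges (ops_row : String) : List (Int × Int × String) :=
  match PySem.Str.pyGet? ops_row 0 with
  | none => []  -- Python raises IndexError here (empty string); excluded by Pre_
  | some c0 =>
    let st := (PySem.List.pyRange 1 (PySem.Str.len ops_row) 1).foldl
      (pvStepARaw ops_row) (PySem.Dict.empty, c0, 0)
    ((st.1.insert (st.2.2, PySem.Str.len ops_row - 1) (String.singleton st.2.1)).items).map
      (fun p => (p.1.1, p.1.2, p.2))

-- ===== PORT B =====
-- B-side helper: the literal body of B's for-loop ('c = ops_row[i]; if c != ' ': rev.append(...); end = i-2')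
def pvStepBRaw (ops_row : String) (st : Int × List ((Int × Int) × Char)) (i : Int) :
    Int × List ((Int × Int) × Char) :=
  match PySem.Str.pyGet? ops_row i with
  | none => st  -- unreachable: i is in range
  | some c =>
    if c ≠ ' ' then (i - 2, st.2 ++ [((i, st.1), c)]) else st

def get_operation_ranges_alt (ops_row : String) : List (Int × Int × String) :=
  let n := PySem.Str.len ops_row
  -- 'for i in reversed(range(1, len(ops_row)))'
  let st := ((PySem.List.pyRange 1 n 1).reverse).foldl (pvStepBRaw ops_row) (n - 1, [])
  match PySem.Str.pyGet? ops_row 0 with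
  | none => []  -- Python raises IndexError here (empty string); excluded by Pre_
  | some c0 =>
    let rev := st.2 ++ [((0, st.1), c0)]
    -- 'dict(reversed(rev))'
    (((rev.reverse).foldl
        (fun d (e : (Int × Int) × Char) => d.insert e.1 (String.singleton e.2))
        PySem.Dict.empty).items).map
      (fun p => (p.1.1, p.1.2, p.2))

-- ===== PRECONDITION & SPEC =====
-- Pre_ excludes only the empty string, on which Python A raises IndexError (ops_row[0]).
def Pre_get_operation_ranges (ops_row : String) : Prop := ops_row ≠ ""
instance (ops_row : String) : Decidable (Pre_get_operation_ranges ops_row) := by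
  unfold Pre_get_operation_ranges; infer_instance

def pvWitness_get_operation_ranges : String := "+  *  - "

def Spec_get_operation_ranges (ops_row : String) (out : List (Int × Int × String)) : Prop :=
  out = get_operation_ranges_alt ops_row
instance (ops_row : String) (out : List (Int × Int × String)) :
    Decidable (Spec_get_operation_ranges ops_row out) := by
  unfold Spec_get_operation_ranges; infer_instance

-- ===== CLAIM (what is proved, stated in full; the proofs are below) =====
def Claim_equal_get_operation_ranges : Prop := ∀ (ops_row : String), Dom_get_operation_ranges ops_row → Pre_get_operation_ranges ops_row → Spec_get_operation_ranges ops_row (get_operation_ranges ops_row)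

-- ===== LEMMAS AND PROOFS =====

-- proof-side helpers
def pvCharD (ops_row : String) (i : Int) : Char := (PySem.Str.pyGet? ops_row i).getD ' '

-- A's step after the space test (valid index, non-space char)
def pvStepA (ops_row : String) (st : PySem.Dict (Int × Int) String × Char × Int) (i : Int) :
    PySem.Dict (Int × Int) String × Char × Int :=
  (st.1.insert (st.2.2, i - 2) (String.singleton st.2.1), pvCharD ops_row i, i)

-- B's step after the space test
def pvStepB (ops_row : String) (st : Int × List ((Int × Int) × Char)) (i : Int) :
    Int × List ((Int × Int) × Char) :=
  (i - 2, st.2 ++ [((i, st.1), pvCharD ops_row i)])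

-- the canonical entry list: for boundaries q :: P, range of q ends 2 before the
-- next boundary, last range ends at n-1
def pvEnts (s : String) (n : Int) : Int → List Int → List ((Int × Int) × Char)
  | q, [] => [((q, n - 1), pvCharD s q)]
  | q, p :: rest => ((q, p - 2), pvCharD s q) :: pvEnts s n p rest

def pvIns (d : PySem.Dict (Int × Int) String) (l : List ((Int × Int) × Char)) :
    PySem.Dict (Int × Int) String :=
  l.foldl (fun d e => d.insert e.1 (String.singleton e.2)) d

-- A's loop followed by its final insert = inserting the canonical entries in order
lemma pv_A (s : String) (n : Int) (P : List Int) :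
    ∀ (d : PySem.Dict (Int × Int) String) (q : Int),
      (P.foldl (pvStepA s) (d, pvCharD s q, q)).1.insert
          ((P.foldl (pvStepA s) (d, pvCharD s q, q)).2.2, n - 1)
          (String.singleton (P.foldl (pvStepA s) (d, pvCharD s q, q)).2.1)
      = pvIns d (pvEnts s n q P) := by
  induction P with
  | nil => intro d q; rfl
  | cons p rest ih =>
    intro d q
    simpa [pvStepA, pvEnts, pvIns] using
      ih (d.insert (q, p - 2) (String.singleton (pvCharD s q))) p

-- B's right-to-left fold, final append, and reversal = the canonical entries
lemma pv_B (s : String) (n : Int) (P : List Int) :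
    ∀ (q : Int),
      ((P.foldr (fun i acc => pvStepB s acc i) (n - 1, ([] : List ((Int × Int) × Char)))).2
          ++ [((q, (P.foldr (fun i acc => pvStepB s acc i) (n - 1, [])).1), pvCharD s q)]).reverse
      = pvEnts s n q P := by
  induction P with
  | nil => intro q; rfl
  | cons p rest ih =>
    intro q
    simp only [List.foldr_cons, pvStepB, pvEnts, ← ih p]
    simp

-- valid index: any i with 0 ≤ i < len gives some
lemma pv_valid (s : String) (i : Int) (h0 : 0 ≤ i) (hn : i < (s.toList.length : Int)) :
    (PySem.Str.pyGet? s i).isSome = true := by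
  simp only [PySem.Str.pyGet?_eq, PySem.Chars.pyGet?_eq_listPyGet?]
  rw [PySem.List.pyGet?_of_nonneg _ h0, List.getElem?_eq_getElem (by omega)]
  rfl

-- ===== VERDICT (by name: the statement is the Claim_ definition above) =====
theorem get_operation_ranges_spec : Claim_equal_get_operation_ranges := by
  intro s _ hpre
  unfold Spec_get_operation_ranges get_operation_ranges get_operation_ranges_alt
  have hne : s.toList ≠ [] := by
    intro h
    exact hpre (by simpa using congrArg String.ofList h)
  have hlen : 0 < s.toList.length := List.length_pos_iff.mpr hne
  have h0v : (PySem.Str.pyGet? s 0).isSome = true :=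
    pv_valid s 0 le_rfl (by exact_mod_cast hlen)
  obtain ⟨c0, hc0⟩ : ∃ c, PySem.Str.pyGet? s 0 = some c := by
    rcases h : PySem.Str.pyGet? s 0 with _ | c
    · rw [h] at h0v; simp at h0v
    · exact ⟨c, rfl⟩
  set n := PySem.Str.len s with hn
  set pred : Int → Bool := fun i => decide ¬(PySem.Str.pyGet? s i = some ' ') with hpred
  set P : List Int := (PySem.List.pyRange 1 n 1).filter pred with hP
  have hmemv : ∀ i ∈ PySem.List.pyRange 1 n 1, (PySem.Str.pyGet? s i).isSome = true := by
    intro i hi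
    rw [PySem.List.mem_pyRange_one] at hi
    have hle : n = (s.toList.length : Int) := by simp [hn]
    exact pv_valid s i (by omega) (by omega)
  -- A's raw loop is the filtered loop with step pvStepA
  have hfgA : ∀ (st : PySem.Dict (Int × Int) String × Char × Int) i,
      i ∈ PySem.List.pyRange 1 n 1 →
      pvStepARaw s st i = if pred i then pvStepA s st i else st := by
    intro st i hi
    have hv := hmemv i hi
    rcases hsome : PySem.Str.pyGet? s i with _ | ch
    · rw [hsome] at hv; simp at hv
    · simp only [hpred, pvStepARaw, hsome, pvStepA, pvCharD]
      by_cases hch : ch = ' '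
      · subst hch; simp
      · simp [hch]
  have hA : (PySem.List.pyRange 1 n 1).foldl (pvStepARaw s) (PySem.Dict.empty, c0, 0)
      = P.foldl (pvStepA s) (PySem.Dict.empty, pvCharD s 0, 0) := by
    have hc0' : c0 = pvCharD s 0 := by rw [pvCharD, hc0]; rfl
    rw [PySem.List.foldl_congr_mem _ _ _ _ hfgA,
      PySem.List.foldl_if_eq_foldl_filter pred (pvStepA s), ← hP, hc0']
  -- B's raw loop is the filtered loop with step pvStepB, over the reversed range
  have hfgB : ∀ (st : Int × List ((Int × Int) × Char)) i,
      i ∈ (PySem.List.pyRange 1 n 1).reverse →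
      pvStepBRaw s st i = if pred i then pvStepB s st i else st := by
    intro st i hi
    have hv := hmemv i (List.mem_reverse.mp hi)
    rcases hsome : PySem.Str.pyGet? s i with _ | ch
    · rw [hsome] at hv; simp at hv
    · simp only [hpred, pvStepBRaw, hsome, pvStepB, pvCharD]
      by_cases hch : ch = ' '
      · subst hch; simp
      · simp [hch]
  have hB : ((PySem.List.pyRange 1 n 1).reverse).foldl (pvStepBRaw s) (n - 1, [])
      = P.foldr (fun i acc => pvStepB s acc i) (n - 1, []) := by
    rw [PySem.List.foldl_congr_mem _ _ _ _ hfgB,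
      PySem.List.foldl_if_eq_foldl_filter pred (pvStepB s),
      List.filter_reverse, ← hP, List.foldl_reverse]
  -- both sides reduce to the canonical entry list
  have hc0' : c0 = pvCharD s 0 := by rw [pvCharD, hc0]; rfl
  simp only [hc0, hA, hB]
  rw [pv_A s n P PySem.Dict.empty 0, hc0', pv_B s n P 0]
  rfl
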